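-- pv_equiv track=rewrite | github.com/GabCespedes/BOCA-2025 | exC.py | energiaMinima
-- ===== SOURCE A (Python) =====
-- import math
--
-- def energiaMinima(N: int) -> int:
--     dp = [math.inf] * (N + 1)
--
--     dp[1] = 2
--     dp[2] = 3
--
--     for k in range(3, N + 1):
--         for i in range(1, k // 2 + 1):
--             custo_atual = dp[i] * dp[k - i]
--             dp[k] = min(dp[k], custo_atual)
--
--     return dp[N]
-- ===== SOURCE B (Python) =====
-- def energiaMinima(N: int) -> int:
--     # closed form: the optimal partition uses only parts of cost 2 and 3,
--     # and the minimum product is 3^(N//2) for even N, 2*3^(N//2) for odd N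
--     half, odd = divmod(N, 2)
--     return (2 if odd == 1 else 1) * 3 ** half
-- ===== Notes on version B (the rewrite author's own statement) =====
-- stated objective: faster
-- what changed: Replaced the O(N^2) dynamic-programming table with the closed form 3^(N//2) (times 2 for odd N) computed by built-in fast exponentiation.
import Mathlib
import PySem

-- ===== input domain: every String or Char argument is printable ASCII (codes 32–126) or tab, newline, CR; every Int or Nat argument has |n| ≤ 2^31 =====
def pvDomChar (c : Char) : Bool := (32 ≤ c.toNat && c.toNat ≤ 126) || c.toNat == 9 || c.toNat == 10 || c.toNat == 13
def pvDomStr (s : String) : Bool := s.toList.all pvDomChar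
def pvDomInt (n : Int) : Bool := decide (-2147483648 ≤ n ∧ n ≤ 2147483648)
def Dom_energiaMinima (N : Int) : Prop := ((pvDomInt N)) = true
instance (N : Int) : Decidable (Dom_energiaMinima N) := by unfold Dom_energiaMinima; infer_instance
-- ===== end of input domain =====

-- B replaces A's O(N^2) DP table with the closed form 3^(N//2) (×2 for odd N); equivalence proved for N ≥ 2 (A raises IndexError below that).

-- ===== PORT A =====
-- dp is a List (Option Int); Python's math.inf initial entry is modelled as `none`
-- (exact: min(inf, x) = x, and for N ≥ 2 an inf entry is never multiplied nor returned,
-- so the `.getD 0` defaults below are never reached on Pre_).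
def pvGet (dp : List (Option Int)) (i : Int) : Option Int := dp.getD i.toNat none

-- body of the inner `for i in range(1, k//2+1)` loop
def pvBody (k : Int) (dp : List (Option Int)) (i : Int) : List (Option Int) :=
  let custo := (pvGet dp i).getD 0 * (pvGet dp (k - i)).getD 0
  dp.set k.toNat (some (match pvGet dp k with
    | none => custo            -- min(inf, custo) = custo
    | some v => min v custo))

-- body of the outer `for k in range(3, N+1)` loop
def pvOuter (dp : List (Option Int)) (k : Int) : List (Option Int) :=
  (PySem.List.pyRange 1 (PySem.Int.floordiv k 2 + 1) 1).foldl (pvBody k) dp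

def energiaMinima (N : Int) : Int :=
  let dp : List (Option Int) := List.replicate (N + 1).toNat none  -- [math.inf] * (N+1)
  let dp := dp.set 1 (some 2)
  let dp := dp.set 2 (some 3)
  let dp := (PySem.List.pyRange 3 (N + 1) 1).foldl pvOuter dp
  (pvGet dp N).getD 0

-- ===== PORT B =====
def energiaMinima_alt (N : Int) : Int :=
  let half := PySem.Int.floordiv N 2
  let odd := PySem.Int.mod N 2
  -- 3 ** half: exact since half ≥ 0 for every N ≥ 0 (Python returns a float for half < 0)
  (if odd = 1 then 2 else 1) * 3 ^ half.toNat

-- ===== PRECONDITION & SPEC =====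
-- Pre_: A raises IndexError for every N ≤ 1 (dp[1] = 2 or dp[2] = 3 is out of range).
def Pre_energiaMinima (N : Int) : Prop := 2 ≤ N
instance (N : Int) : Decidable (Pre_energiaMinima N) := by unfold Pre_energiaMinima; infer_instance
def pvWitness_energiaMinima : Int := (5)

def Spec_energiaMinima (N : Int) (out : Int) : Prop := out = energiaMinima_alt N
instance (N : Int) (out : Int) : Decidable (Spec_energiaMinima N out) := by unfold Spec_energiaMinima; infer_instance

-- ===== CLAIM (what is proved, stated in full; the proofs are below) =====
def Claim_equal_energiaMinima : Prop := ∀ (N : Int), Dom_energiaMinima N → Pre_energiaMinima N → Spec_energiaMinima N (energiaMinima N)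

-- ===== LEMMAS AND PROOFS =====

-- closed-form table value
def F (n : Nat) : Int := (if n % 2 = 1 then 2 else 1) * 3 ^ (n / 2)

-- the running minimum computed at dp[k] by the inner loop, abstractly
def mfold (q : Int → Int) (acc : Option Int) (l : List Int) : Option Int :=
  l.foldl (fun a i => some (match a with | none => q i | some v => min v (q i))) acc

-- the product A multiplies at step i of row k
def qk (kn : Nat) (i : Int) : Int := F i.toNat * F ((kn : Int) - i).toNat

-- invariant: dp holds F on 1..m and none elsewhere
def pvInv (dp : List (Option Int)) (m len : Nat) : Prop :=
  dp.length = len ∧ ∀ j : Nat, dp.getD j none = if 1 ≤ j ∧ j ≤ m then some (F j) else none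

lemma Fprod_eq (kn a : Nat) (_h1 : 1 ≤ a) (h2 : a ≤ kn / 2) (hpar : a % 2 = kn % 2) :
    F a * F (kn - a) = F kn := by
  have ha : a ≤ kn := le_trans h2 (Nat.div_le_self _ _)
  unfold F
  by_cases hk : kn % 2 = 1
  · have h1' : a % 2 = 1 := by omega
    have h3' : (kn - a) % 2 ≠ 1 := by omega
    have hexp : kn / 2 = a / 2 + (kn - a) / 2 := by omega
    rw [if_pos h1', if_neg h3', if_pos hk, hexp, pow_add]; ring
  · have h1' : a % 2 ≠ 1 := by omega
    have h3' : (kn - a) % 2 ≠ 1 := by omega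
    have hexp : kn / 2 = a / 2 + (kn - a) / 2 := by omega
    rw [if_neg h1', if_neg h3', if_neg hk, hexp, pow_add]; ring

lemma Fprod_ge (kn a : Nat) (_h3 : 3 ≤ kn) (h1 : 1 ≤ a) (h2 : a ≤ kn / 2) :
    F kn ≤ F a * F (kn - a) := by
  have ha : a ≤ kn := le_trans h2 (Nat.div_le_self _ _)
  by_cases hpar : a % 2 = kn % 2
  · exact le_of_eq (Fprod_eq kn a h1 h2 hpar).symm
  · unfold F
    by_cases hk : kn % 2 = 1
    · -- a even, kn odd: the product still equals F kn
      have h1' : a % 2 ≠ 1 := by omega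
      have h3' : (kn - a) % 2 = 1 := by omega
      have hexp : kn / 2 = a / 2 + (kn - a) / 2 := by omega
      rw [if_neg h1', if_pos h3', if_pos hk, hexp, pow_add]
      exact le_of_eq (by ring)
    · -- a odd, kn even: product is 4*3^(kn/2-1) ≥ 3^(kn/2)
      have h1' : a % 2 = 1 := by omega
      have h3' : (kn - a) % 2 = 1 := by omega
      have hexp : kn / 2 = (a / 2 + (kn - a) / 2) + 1 := by omega
      rw [if_pos h1', if_pos h3', if_neg hk, hexp, pow_add, pow_add]
      have hp : (0:Int) < 3 ^ (a / 2) * 3 ^ ((kn - a) / 2) := by positivity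
      nlinarith [hp]

lemma mfold_ge (q : Int → Int) (c : Int) :
    ∀ l : List Int, (∀ i ∈ l, c ≤ q i) → mfold q (some c) l = some c := by
  intro l
  induction l with
  | nil => intro _; rfl
  | cons i t ih =>
      intro h
      have hc : min c (q i) = c := min_eq_left (h i (by simp))
      simp only [mfold, List.foldl_cons] at *
      rw [hc]; exact ih (fun x hx => h x (by simp [hx]))

lemma qk_ge (kn : Nat) (h3 : 3 ≤ kn) (i : Int) (hi1 : 1 ≤ i) (hi2 : i ≤ ((kn / 2 : Nat) : Int)) :
    F kn ≤ qk kn i := by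
  obtain ⟨a, rfl⟩ : ∃ a : Nat, i = ↑a := ⟨i.toNat, (Int.toNat_of_nonneg (by omega)).symm⟩
  have h1 : 1 ≤ a := by exact_mod_cast hi1
  have h2 : a ≤ kn / 2 := by exact_mod_cast hi2
  have hsub : ((kn : Int) - ↑a).toNat = kn - a := by omega
  unfold qk
  rw [Int.toNat_natCast, hsub]
  exact Fprod_ge kn a h3 h1 h2


lemma mfold_none_cons (q : Int → Int) (i : Int) (l : List Int) :
    mfold q none (i :: l) = mfold q (some (q i)) l := rfl

lemma mfold_some_cons (q : Int → Int) (v : Int) (i : Int) (l : List Int) :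
    mfold q (some v) (i :: l) = mfold q (some (min v (q i))) l := rfl

-- the inner loop: entries ≠ k unchanged, entry k becomes the running minimum
lemma inner_fold (len kn : Nat) (h3 : 3 ≤ kn) (hlen : kn < len) :
    ∀ (l : List Int), (∀ i ∈ l, 1 ≤ i ∧ i ≤ ((kn / 2 : Nat) : Int)) →
    ∀ dp : List (Option Int), dp.length = len →
      (∀ j : Nat, 1 ≤ j → j < kn → dp.getD j none = some (F j)) →
      (l.foldl (pvBody (kn : Int)) dp).length = len ∧
      (∀ j : Nat, j ≠ kn → (l.foldl (pvBody (kn : Int)) dp).getD j none = dp.getD j none) ∧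
      (l.foldl (pvBody (kn : Int)) dp).getD kn none = mfold (qk kn) (dp.getD kn none) l := by
  intro l
  induction l with
  | nil => intro _ dp hlen' _; exact ⟨hlen', fun _ _ => rfl, rfl⟩
  | cons i t ih =>
    intro hmem dp hlen' hinv
    obtain ⟨hi1, hi2⟩ := hmem i (by simp)
    have hr1 : pvGet dp i = some (F i.toNat) := by
      unfold pvGet
      exact hinv i.toNat (by omega) (by omega)
    have hr2 : pvGet dp ((kn : Int) - i) = some (F ((kn : Int) - i).toNat) := by
      unfold pvGet
      exact hinv ((kn : Int) - i).toNat (by omega) (by omega)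
    have hbody : pvBody (kn : Int) dp i
        = dp.set kn (some (match dp.getD kn none with
            | none => qk kn i
            | some v => min v (qk kn i))) := by
      unfold pvBody
      rw [hr1, hr2]
      have hg : pvGet dp (kn : Int) = dp.getD kn none := by
        unfold pvGet; rw [Int.toNat_natCast]
      rw [hg]
      rfl
    have key : ∀ v : Int,
        (t.foldl (pvBody (kn : Int)) (dp.set kn (some v))).length = len ∧
        (∀ j : Nat, j ≠ kn →
          (t.foldl (pvBody (kn : Int)) (dp.set kn (some v))).getD j none = dp.getD j none) ∧
        (t.foldl (pvBody (kn : Int)) (dp.set kn (some v))).getD kn none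
          = mfold (qk kn) (some v) t := by
      intro v
      have hlen2 : (dp.set kn (some v)).length = len := by rw [List.length_set]; exact hlen'
      have hinv2 : ∀ j : Nat, 1 ≤ j → j < kn →
          (dp.set kn (some v)).getD j none = some (F j) := by
        intro j hj1 hj2
        rw [List.getD_eq_getElem?_getD, List.getElem?_set_ne (by omega),
          ← List.getD_eq_getElem?_getD]
        exact hinv j hj1 hj2
      obtain ⟨ha, hb, hc⟩ := ih (fun x hx => hmem x (by simp [hx])) (dp.set kn (some v)) hlen2 hinv2
      refine ⟨ha, fun j hj => ?_, ?_⟩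
      · rw [hb j hj, List.getD_eq_getElem?_getD, List.getElem?_set_ne (by omega),
          ← List.getD_eq_getElem?_getD]
      · rw [hc]
        congr 1
        rw [List.getD_eq_getElem?_getD, List.getElem?_set_self (by omega), Option.getD_some]
    rw [List.foldl_cons, hbody]
    cases hdp : dp.getD kn none with
    | none =>
        rw [mfold_none_cons]
        exact key (qk kn i)
    | some w =>
        rw [mfold_some_cons]
        exact key (min w (qk kn i))

-- the inner minimum over the full range equals the closed form
lemma mfold_closed (kn : Nat) (h3 : 3 ≤ kn) :
    mfold (qk kn) none (PySem.List.pyRange 1 (((kn / 2 : Nat) : Int) + 1) 1) = some (F kn) := by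
  have hh1 : (1 : Int) < ((kn / 2 : Nat) : Int) + 1 := by omega
  rw [PySem.List.pyRange_one_cons hh1, mfold_none_cons]
  have h12 : (1 : Int) + 1 = 2 := by norm_num
  rw [h12]
  by_cases hk : kn % 2 = 1
  · -- odd k: already the first product 2*3^((k-1)/2) is the closed form
    have hq1 : qk kn 1 = F kn := by
      unfold qk
      have hs : ((kn : Int) - 1).toNat = kn - 1 := by omega
      rw [hs]
      exact Fprod_eq kn 1 (by omega) (by omega) (by omega)
    rw [hq1]
    apply mfold_ge
    intro x hx
    rw [PySem.List.mem_pyRange_one] at hx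
    exact qk_ge kn h3 x (by omega) (by omega)
  · -- even k: the product at i = 2 is the closed form, the one at i = 1 is ≥
    have hh2 : (2 : Int) < ((kn / 2 : Nat) : Int) + 1 := by omega
    rw [PySem.List.pyRange_one_cons hh2, mfold_some_cons]
    have hq2 : qk kn 2 = F kn := by
      unfold qk
      have hs : ((kn : Int) - 2).toNat = kn - 2 := by omega
      rw [hs]
      exact Fprod_eq kn 2 (by omega) (by omega) (by omega)
    have hq1 : F kn ≤ qk kn 1 := qk_ge kn h3 1 (by omega) (by omega)
    rw [hq2] at *
    have hmin : min (qk kn 1) (F kn) = F kn := min_eq_right hq1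
    rw [hmin]
    apply mfold_ge
    intro x hx
    rw [PySem.List.mem_pyRange_one] at hx
    exact qk_ge kn h3 x (by omega) (by omega)

-- one outer step preserves the invariant
lemma outer_step (len kn : Nat) (h3 : 3 ≤ kn) (hlen : kn < len) (dp : List (Option Int))
    (h : pvInv dp (kn - 1) len) : pvInv (pvOuter dp (kn : Int)) kn len := by
  obtain ⟨hlen', hjs⟩ := h
  unfold pvOuter
  have hfd : PySem.Int.floordiv (kn : Int) 2 = ((kn / 2 : Nat) : Int) := by
    exact_mod_cast PySem.Int.floordiv_natCast kn 2
  rw [hfd]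
  have hinv : ∀ j : Nat, 1 ≤ j → j < kn → dp.getD j none = some (F j) := by
    intro j h1 h2
    rw [hjs j, if_pos (by omega)]
  have hbnd : ∀ i ∈ PySem.List.pyRange 1 (((kn / 2 : Nat) : Int) + 1) 1,
      1 ≤ i ∧ i ≤ ((kn / 2 : Nat) : Int) := by
    intro i hi; rw [PySem.List.mem_pyRange_one] at hi; omega
  obtain ⟨ha, hb, hc⟩ := inner_fold len kn h3 hlen _ hbnd dp hlen' hinv
  refine ⟨ha, fun j => ?_⟩
  by_cases hj : j = kn
  · subst hj
    have h0 : dp.getD j none = none := by rw [hjs j, if_neg (by omega)]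
    rw [hc, h0, mfold_closed _ h3, if_pos (by omega)]
  · rw [hb j hj, hjs j]
    by_cases hcond : 1 ≤ j ∧ j ≤ kn - 1
    · rw [if_pos hcond, if_pos (by omega)]
    · rw [if_neg hcond, if_neg (by omega)]

lemma outer_fold (n : Nat) (_hn : 2 ≤ n) (dp0 : List (Option Int)) (h0 : pvInv dp0 2 (n + 1)) :
    ∀ m : Nat, 2 ≤ m → m ≤ n →
      pvInv ((PySem.List.pyRange 3 ((m : Int) + 1) 1).foldl pvOuter dp0) m (n + 1) := by
  intro m hm
  induction m, hm using Nat.le_induction with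
  | base =>
      intro _
      rw [PySem.List.pyRange_one_eq_nil (by omega)]
      exact h0
  | succ m hm ih =>
      intro hmn
      have hsplit : PySem.List.pyRange 3 (((m + 1 : Nat) : Int) + 1) 1
          = PySem.List.pyRange 3 ((m : Int) + 1) 1 ++ [(m : Int) + 1] := by
        have hc1 : ((m + 1 : Nat) : Int) + 1 = ((m : Int) + 1) + 1 := by push_cast; ring
        rw [hc1, PySem.List.pyRange_one_succ_right (by omega)]
      rw [hsplit, List.foldl_append, List.foldl_cons, List.foldl_nil]
      have hcast : ((m : Int) + 1) = ((m + 1 : Nat) : Int) := by push_cast; ring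
      rw [hcast]
      have hstep := outer_step (n + 1) (m + 1) (by omega) (by omega) _
        (by simpa using ih (by omega))
      simpa using hstep

lemma alt_closed (n : Nat) : energiaMinima_alt (n : Int) = F n := by
  unfold energiaMinima_alt F
  have h1 : PySem.Int.floordiv (n:Int) 2 = ((n / 2 : Nat) : Int) := by
    exact_mod_cast PySem.Int.floordiv_natCast n 2
  have h2 : PySem.Int.mod (n:Int) 2 = ((n % 2 : Nat) : Int) := by
    exact_mod_cast PySem.Int.mod_natCast n 2
  rw [h1, h2]
  simp only [Int.toNat_natCast]
  have hiff : (((n % 2 : Nat) : Int) = 1) ↔ n % 2 = 1 := by omega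
  simp only [hiff]

-- ===== VERDICT (by name: the statement is the Claim_ definition above) =====
lemma init_inv (n : Nat) (hn : 2 ≤ n) :
    pvInv (((List.replicate (((n : Int) + 1).toNat) (none : Option Int)).set 1
      (some 2)).set 2 (some 3)) 2 (n + 1) := by
  have hrep : ((n : Int) + 1).toNat = n + 1 := by omega
  constructor
  · simp [hrep]
  · intro j
    rw [List.getD_eq_getElem?_getD]
    by_cases h2 : j = 2
    · subst h2
      rw [List.getElem?_set_self (by simp only [List.length_set, List.length_replicate, hrep]; omega)]
      have : F 2 = 3 := by decide
      simp [this]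
    · rw [List.getElem?_set_ne (by omega)]
      by_cases h1 : j = 1
      · subst h1
        rw [List.getElem?_set_self (by simp only [List.length_replicate, hrep]; omega)]
        have : F 1 = 2 := by decide
        simp [this]
      · rw [List.getElem?_set_ne (by omega), List.getElem?_replicate]
        split_ifs <;> simp_all <;> omega

theorem energiaMinima_spec : Claim_equal_energiaMinima := by
  intro N _ hpre
  unfold Pre_energiaMinima at hpre
  unfold Spec_energiaMinima
  obtain ⟨n, rfl⟩ : ∃ n : Nat, N = ↑n := ⟨N.toNat, (Int.toNat_of_nonneg (by omega)).symm⟩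
  have hn : 2 ≤ n := by exact_mod_cast hpre
  rw [alt_closed]
  simp only [energiaMinima]
  obtain ⟨hlen, hj⟩ := outer_fold n hn _ (init_inv n hn) n hn le_rfl
  unfold pvGet
  rw [Int.toNat_natCast, hj n, if_pos (by omega), Option.getD_some]
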